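-- pv_equiv track=rewrite | github.com/growexx/Matangi-AI-Automation | thread_processor/thread_fetcher.py | _find_signature_with_name
-- ===== SOURCE A (Python) =====
-- def _find_signature_with_name(lines: list, name_parts: list) -> int:
--     if not name_parts:
--         return None
--
--     # Simple signature starters
--     sig_starters = ['regards', 'best', 'thanks', 'cheers', 'sincerely']
--
--     # Look for signature starter followed by name in next few lines
--     for i, line in enumerate(lines):
--         line_lower = line.strip().lower()
--
--         # Check if line starts with signature words
--         if any(starter in line_lower for starter in sig_starters):
--             # Check next 3 lines for sender name
--             for j in range(i + 1, min(i + 4, len(lines))):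
--                 check_line = lines[j].strip()
--                 if check_line and any(name.lower() in check_line.lower() for name in name_parts):
--                     return i  # Drop everything from signature starter
--
--     return None
-- ===== SOURCE B (Python) =====
-- def _find_signature_with_name(lines: list, name_parts: list) -> int:
--     # Two precomputation passes (starter flags/indices, then name-bearing lines among
--     # the window candidates) and a linear two-pointer merge, instead of A's nested
--     # 3-line window rescans.
--     if not name_parts:
--         return None
--
--     sig_starters = ['regards', 'best', 'thanks', 'cheers', 'sincerely']
--     parts_low = [p.lower() for p in name_parts]
--
--     # Pass 1: which lines contain a signature starter.
--     starter_flags = [any(st in line.strip().lower() for st in sig_starters)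
--                      for line in lines]
--     starter_idx = [i for i, f in enumerate(starter_flags) if f]
--
--     # Pass 2: indices of non-empty name-bearing lines among the candidates
--     # (a candidate is a line at most 3 lines after some starter line).
--     name_idx = [j for j, line in enumerate(lines)
--                 if any(starter_flags[t] for t in range(max(j - 3, 0), j))
--                 and line.strip() and any(p in line.strip().lower() for p in parts_low)]
--
--     # Merge: first starter with a name-bearing line among the next 3 lines.
--     k = 0
--     for i in starter_idx:
--         while k < len(name_idx) and name_idx[k] <= i:
--             k += 1
--         if k < len(name_idx) and name_idx[k] - i < 4:
--             return i
--     return None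
-- ===== Notes on version B (the rewrite author's own statement) =====
-- stated objective: alternative
-- what changed: Replaces A's per-line nested 3-line window rescan by two precomputation passes (starter-line indices and name-bearing-line indices) followed by a single linear two-pointer merge over the two index lists.
import Mathlib
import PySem

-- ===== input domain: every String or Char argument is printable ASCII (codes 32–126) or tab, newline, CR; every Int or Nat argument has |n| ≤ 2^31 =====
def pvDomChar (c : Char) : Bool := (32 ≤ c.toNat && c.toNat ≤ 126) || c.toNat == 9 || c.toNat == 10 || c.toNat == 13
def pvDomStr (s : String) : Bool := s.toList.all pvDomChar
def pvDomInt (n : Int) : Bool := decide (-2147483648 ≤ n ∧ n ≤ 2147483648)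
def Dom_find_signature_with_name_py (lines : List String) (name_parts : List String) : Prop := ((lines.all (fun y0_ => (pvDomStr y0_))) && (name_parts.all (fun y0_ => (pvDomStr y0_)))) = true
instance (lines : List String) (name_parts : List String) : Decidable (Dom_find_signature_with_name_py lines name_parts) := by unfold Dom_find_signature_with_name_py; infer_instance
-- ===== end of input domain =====

-- B replaces the nested 3-line window rescans by two index-precomputation passes and a
-- linear two-pointer merge (alternative decomposition, same asymptotic cost).

-- ===== PORT A =====
def pvA_sigStarters : List String := ["regards", "best", "thanks", "cheers", "sincerely"]

-- 'check_line and any(name.lower() in check_line.lower() for name in name_parts)'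
def pvA_nameCheck (name_parts : List String) (s : String) : Bool :=
  let check_line := PySem.Str.strip s
  PySem.Str.len check_line != 0 &&
    name_parts.any (fun name => PySem.Str.isIn (PySem.Str.lower name) (PySem.Str.lower check_line))

-- inner 'for j in range(i+1, min(i+4, len(lines))): … return i' (as: did it hit?)
def pvA_inner (lines : List String) (name_parts : List String) : List Int → Bool
  | [] => false
  | j :: rest =>
    match PySem.List.pyGet? lines j with
    | none => false  -- unreachable: every j produced by the range is in bounds
    | some lj => if pvA_nameCheck name_parts lj then true else pvA_inner lines name_parts rest

-- outer 'for i, line in enumerate(lines): …'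
def pvA_outer (lines : List String) (name_parts : List String) : List (Int × String) → Option Int
  | [] => none
  | (i, line) :: rest =>
    let line_lower := PySem.Str.lower (PySem.Str.strip line)
    if pvA_sigStarters.any (fun starter => PySem.Str.isIn starter line_lower) then
      if pvA_inner lines name_parts
          (PySem.List.pyRange (i + 1) (min (i + 4) (lines.length : Int)) 1) then some i
      else pvA_outer lines name_parts rest
    else pvA_outer lines name_parts rest

def find_signature_with_name_py (lines : List String) (name_parts : List String) : Option Int :=
  if name_parts.isEmpty then none
  else pvA_outer lines name_parts (PySem.List.enumerate lines 0)

-- ===== PORT B =====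
def pvB_sigStarters : List String := ["regards", "best", "thanks", "cheers", "sincerely"]

def pvB_isStarter (line : String) : Bool :=
  pvB_sigStarters.any (fun st => PySem.Str.isIn st (PySem.Str.lower (PySem.Str.strip line)))

def pvB_isName (parts_low : List String) (line : String) : Bool :=
  PySem.Str.len (PySem.Str.strip line) != 0 &&
    parts_low.any (fun p => PySem.Str.isIn p (PySem.Str.lower (PySem.Str.strip line)))

-- candidate test: some starter line lies at most 3 lines before j
def pvB_candWin (flags : List Bool) (j : Int) : Bool :=
  (PySem.List.pyRange (max (j - 3) 0) j 1).any (fun t => (PySem.List.pyGet? flags t).getD false)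

-- the two-pointer merge: the pointer k is the remaining suffix of name_idx
def pvB_walk : List Int → List Int → Option Int
  | _, [] => none
  | name_idx, i :: rest =>
    let nk := name_idx.dropWhile (fun m => decide (m ≤ i))
    match nk with
    | [] => pvB_walk nk rest
    | m :: _ => if m - i < 4 then some i else pvB_walk nk rest

def find_signature_with_name_py_alt (lines : List String) (name_parts : List String) : Option Int :=
  if name_parts.isEmpty then none
  else
    let parts_low := name_parts.map PySem.Str.lower
    let starter_flags := lines.map pvB_isStarter
    let starter_idx := ((PySem.List.enumerate starter_flags 0).filter (fun p => p.2)).map (·.1)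
    let name_idx := ((PySem.List.enumerate lines 0).filter
      (fun p => pvB_candWin starter_flags p.1 && pvB_isName parts_low p.2)).map (·.1)
    pvB_walk name_idx starter_idx

-- ===== PRECONDITION & SPEC =====
def Spec_find_signature_with_name_py (lines : List String) (name_parts : List String) (out : Option Int) : Prop := out = find_signature_with_name_py_alt lines name_parts
instance (lines : List String) (name_parts : List String) (out : Option Int) : Decidable (Spec_find_signature_with_name_py lines name_parts out) := by unfold Spec_find_signature_with_name_py; infer_instance

-- ===== CLAIM (what is proved, stated in full; the proofs are below) =====
def Claim_equal_find_signature_with_name_py : Prop := ∀ (lines : List String) (name_parts : List String), Dom_find_signature_with_name_py lines name_parts → Spec_find_signature_with_name_py lines name_parts (find_signature_with_name_py lines name_parts)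

-- ===== LEMMAS AND PROOFS =====

-- the per-line predicates agree
theorem pv_name_eq (name_parts : List String) (s : String) :
    pvB_isName (name_parts.map PySem.Str.lower) s = pvA_nameCheck name_parts s := by
  simp [pvB_isName, pvA_nameCheck, List.any_map, Function.comp_def]

-- A's inner loop is an 'any' over the range
theorem pvA_inner_eq_any (lines name_parts : List String) (js : List Int)
    (hin : ∀ j ∈ js, (PySem.List.pyGet? lines j).isSome) :
    pvA_inner lines name_parts js =
      js.any (fun j => ((PySem.List.pyGet? lines j).map (pvA_nameCheck name_parts)).getD false) := by
  induction js with
  | nil => rfl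
  | cons j rest ih =>
    simp only [pvA_inner, List.any_cons]
    cases h : PySem.List.pyGet? lines j with
    | none => exact absurd (hin j (by simp)) (by simp [h])
    | some lj =>
      have ihr := ih (fun j' hj' => hin j' (by simp [hj']))
      simp only [h, Option.map_some, Option.getD_some]
      by_cases hc : pvA_nameCheck name_parts lj = true <;> simp [hc, ihr]

-- A's outer loop is a find? over the enumerated list
theorem pvA_outer_eq_find? (lines name_parts : List String) (l : List (Int × String)) :
    pvA_outer lines name_parts l =
      (l.find? (fun p => pvB_isStarter p.2 &&
        pvA_inner lines name_parts
          (PySem.List.pyRange (p.1 + 1) (min (p.1 + 4) (lines.length : Int)) 1))).map (·.1) := by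
  induction l with
  | nil => rfl
  | cons p rest ih =>
    obtain ⟨i, line⟩ := p
    have hst : (pvA_sigStarters.any (fun starter =>
        PySem.Str.isIn starter (PySem.Str.lower (PySem.Str.strip line)))) = pvB_isStarter line := by
      simp [pvB_isStarter, pvA_sigStarters, pvB_sigStarters]
    simp only [pvA_outer, hst, List.find?_cons]
    by_cases h1 : pvB_isStarter line = true
    · by_cases h2 : pvA_inner lines name_parts
          (PySem.List.pyRange (i + 1) (min (i + 4) (lines.length : Int)) 1) = true
      · simp [h1, h2]
      · simp [h1, h2, ih]
    · simp [h1, ih]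

-- dropWhile (≤ i') after dropWhile (≤ i) with i ≤ i' is dropWhile (≤ i')
theorem pv_dropWhile_dropWhile (l : List Int) (i i' : Int) (h : i ≤ i') :
    (l.dropWhile (fun m => decide (m ≤ i))).dropWhile (fun m => decide (m ≤ i')) =
      l.dropWhile (fun m => decide (m ≤ i')) := by
  induction l with
  | nil => rfl
  | cons a t ih =>
    by_cases ha : a ≤ i
    · have ha' : a ≤ i' := le_trans ha h
      simp [List.dropWhile_cons, ha, ha', ih]
    · simp [List.dropWhile_cons, ha]

-- B's per-starter test, written as which the walk computes
def pvB_cond (name_idx : List Int) (i : Int) : Bool :=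
  ((name_idx.dropWhile (fun m => decide (m ≤ i))).head?.map (fun m => decide (m - i < 4))).getD false

-- the walk is a find? with pvB_cond, provided the starters are ascending from i0
theorem pvB_walk_eq_find? (starters : List Int) : ∀ (full : List Int) (i0 : Int),
    (∀ i ∈ starters, i0 ≤ i) → starters.Pairwise (· ≤ ·) →
    pvB_walk (full.dropWhile (fun m => decide (m ≤ i0))) starters =
      starters.find? (pvB_cond full) := by
  induction starters with
  | nil => intro full i0 _ _; rfl
  | cons i rest ih =>
    intro full i0 hlo hpw
    have hii : i0 ≤ i := hlo i (by simp)
    have hdw : (full.dropWhile (fun m => decide (m ≤ i0))).dropWhile (fun m => decide (m ≤ i)) =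
        full.dropWhile (fun m => decide (m ≤ i)) := pv_dropWhile_dropWhile full i0 i hii
    have hrest : ∀ i' ∈ rest, i ≤ i' := fun i' hi' => (List.pairwise_cons.mp hpw).1 i' hi'
    have ihr := ih (full) i (hrest) (List.pairwise_cons.mp hpw).2
    simp only [pvB_walk, hdw, List.find?_cons]
    cases hh : full.dropWhile (fun m => decide (m ≤ i)) with
    | nil =>
      have : pvB_cond full i = false := by simp [pvB_cond, hh]
      rw [this]
      simpa [hh] using ihr
    | cons m tl =>
      have hc : pvB_cond full i = decide (m - i < 4) := by simp [pvB_cond, hh]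
      rw [hc]
      by_cases hm : m - i < 4
      · simp [hm]
      · simpa [hm, hh] using ihr

-- for an ascending list, pvB_cond is an existence test over a window
theorem pvB_cond_eq_any (l : List Int) (hl : l.Pairwise (· ≤ ·)) (i : Int) :
    pvB_cond l i = l.any (fun m => decide (i < m) && decide (m < i + 4)) := by
  induction l with
  | nil => rfl
  | cons a t ih =>
    have hpw := List.pairwise_cons.mp hl
    by_cases ha : a ≤ i
    · have : ¬ (i < a) := by omega
      simp only [pvB_cond, List.dropWhile_cons, ha, decide_true, List.any_cons]
      simp only [pvB_cond] at ih
      simp [this, ih hpw.2]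
    · have hdw : (a :: t).dropWhile (fun m => decide (m ≤ i)) = a :: t := by
        simp [List.dropWhile_cons, ha]
      by_cases hb : a < i + 4
      · have hL : pvB_cond (a :: t) i = true := by simp [pvB_cond, hdw]; omega
        rw [hL]; symm; rw [List.any_eq_true]
        exact ⟨a, by simp, by simp; omega⟩
      · have hL : pvB_cond (a :: t) i = false := by simp [pvB_cond, hdw]; omega
        rw [hL]; symm; rw [List.any_eq_false]
        intro m hm
        rcases List.mem_cons.mp hm with rfl | hmt
        · simp; omega
        · have := hpw.1 m hmt; simp; omega

-- membership in B's name-index list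
theorem pv_mem_name_idx (lines name_parts : List String) (m : Int) :
    (m ∈ ((PySem.List.enumerate lines 0).filter
        (fun p => pvB_candWin (lines.map pvB_isStarter) p.1 &&
          pvB_isName (name_parts.map PySem.Str.lower) p.2)).map (·.1)) ↔
      ∃ k : Nat, ∃ h : k < lines.length, m = (k : Int) ∧
        pvB_candWin (lines.map pvB_isStarter) (k : Int) = true ∧
        pvA_nameCheck name_parts lines[k] = true := by
  simp only [List.mem_map, List.mem_filter, Bool.and_eq_true]
  constructor
  · rintro ⟨p, ⟨hpE, hpc, hpf⟩, hp1⟩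
    obtain ⟨k, hk, rfl⟩ := (PySem.List.mem_enumerate_iff _ _ _).mp hpE
    exact ⟨k, hk, by simpa using hp1.symm, by simpa using hpc, by simpa [pv_name_eq] using hpf⟩
  · rintro ⟨k, hk, rfl, hcand, hname⟩
    exact ⟨((k : Int), lines[k]), ⟨(PySem.List.mem_enumerate_iff _ _ _).mpr ⟨k, hk, by simp⟩,
      by simpa using hcand, by simpa [pv_name_eq] using hname⟩, rfl⟩

-- the candidate flag reads the starter flag of a line
theorem pv_candWin_true (lines : List String) (k0 k : Nat) (hk0 : k0 < lines.length)
    (hs : pvB_isStarter lines[k0] = true) (h1 : (k0 : Int) < (k : Int))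
    (h2 : (k : Int) < (k0 : Int) + 4) :
    pvB_candWin (lines.map pvB_isStarter) (k : Int) = true := by
  rw [pvB_candWin, List.any_eq_true]
  refine ⟨(k0 : Int), ?_, ?_⟩
  · rw [PySem.List.mem_pyRange_one]; omega
  · simp [PySem.List.pyGet?_natCast, List.getElem?_map,
      List.getElem?_eq_getElem hk0, hs]

-- enumerate of a mapped list
theorem pv_enumerate_map {α β : Type} (f : α → β) (xs : List α) : ∀ (s : Int),
    PySem.List.enumerate (xs.map f) s = (PySem.List.enumerate xs s).map (fun p => (p.1, f p.2)) := by
  induction xs with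
  | nil => intro s; simp [PySem.List.enumerate_nil]
  | cons x t ih => intro s; simp [PySem.List.enumerate_cons, ih]

-- starter indices read off the flag list are the starter indices of the lines
theorem pv_starter_idx_eq (lines : List String) :
    ((PySem.List.enumerate (lines.map pvB_isStarter) 0).filter (fun p => p.2)).map (·.1) =
      ((PySem.List.enumerate lines 0).filter (fun p => pvB_isStarter p.2)).map (·.1) := by
  rw [pv_enumerate_map, List.filter_map, List.map_map]
  simp [Function.comp_def]

-- name-index list is ascending
theorem pv_name_idx_sorted (lines : List String) (f : Int × String → Bool) :
    (((PySem.List.enumerate lines 0).filter f).map (·.1)).Pairwise (· ≤ ·) := by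
  have h := PySem.List.pairwise_lt_enumerate lines 0
  have h2 := List.Pairwise.filter f h
  have h3 := h2.map (·.1) (by intro a b hab; exact hab)
  exact h3.imp (fun {a b} h => le_of_lt h)

-- the window tests agree at a starter line
theorem pv_window_eq (lines name_parts : List String) (k0 : Nat) (hk0 : k0 < lines.length)
    (hs : pvB_isStarter lines[k0] = true) :
    pvA_inner lines name_parts
        (PySem.List.pyRange ((k0 : Int) + 1) (min ((k0 : Int) + 4) (lines.length : Int)) 1) =
      pvB_cond (((PySem.List.enumerate lines 0).filter
        (fun p => pvB_candWin (lines.map pvB_isStarter) p.1 &&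
          pvB_isName (name_parts.map PySem.Str.lower) p.2)).map (·.1)) (k0 : Int) := by
  have hin : ∀ j ∈ PySem.List.pyRange ((k0 : Int) + 1) (min ((k0 : Int) + 4) (lines.length : Int)) 1,
      (PySem.List.pyGet? lines j).isSome := by
    intro j hj
    rw [PySem.List.mem_pyRange_one] at hj
    have hj0 : 0 ≤ j := by omega
    obtain ⟨k, rfl⟩ := Int.eq_ofNat_of_zero_le hj0
    have hkn : k < lines.length := by omega
    simp [PySem.List.pyGet?_natCast, List.getElem?_eq_getElem hkn]
  rw [pvB_cond_eq_any _ (pv_name_idx_sorted lines _) (k0 : Int), pvA_inner_eq_any _ _ _ hin]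
  rw [Bool.eq_iff_iff]
  simp only [List.any_eq_true]
  constructor
  · rintro ⟨j, hj, hcheck⟩
    rw [PySem.List.mem_pyRange_one] at hj
    have hj0 : 0 ≤ j := by omega
    obtain ⟨k, rfl⟩ := Int.eq_ofNat_of_zero_le hj0
    have hkn : k < lines.length := by omega
    refine ⟨(k : Int), ?_, ?_⟩
    · refine (pv_mem_name_idx lines name_parts (k : Int)).mpr ⟨k, hkn, rfl, ?_, ?_⟩
      · exact pv_candWin_true lines k0 k hk0 hs (by omega) (by omega)
      · simpa [PySem.List.pyGet?_natCast, List.getElem?_eq_getElem hkn] using hcheck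
    · simp; omega
  · rintro ⟨m, hm, hw⟩
    obtain ⟨k, hkn, rfl, _, hname⟩ := (pv_mem_name_idx lines name_parts m).mp hm
    simp only [Bool.and_eq_true, decide_eq_true_eq] at hw
    refine ⟨(k : Int), ?_, ?_⟩
    · rw [PySem.List.mem_pyRange_one]; omega
    · simpa [PySem.List.pyGet?_natCast, List.getElem?_eq_getElem hkn] using hname

-- find? over filter+map of the enumerated list equals find? over the enumerated list
theorem pv_find_filter_map (l : List (Int × String)) (q : Int × String → Bool) (c : Int → Bool) :
    ((l.filter q).map (·.1)).find? c = (l.find? (fun p => q p && c p.1)).map (·.1) := by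
  induction l with
  | nil => rfl
  | cons p rest ih =>
    by_cases hq : q p = true
    · by_cases hc : c p.1 = true
      · simp [List.filter_cons, hq, List.find?_cons, hc]
      · simp [List.filter_cons, hq, List.find?_cons, hc, ih]
    · simp [List.filter_cons, hq, List.find?_cons, ih]

-- find? congruence on members
theorem pv_find_congr (l : List (Int × String)) (f g : Int × String → Bool)
    (h : ∀ p ∈ l, f p = g p) : l.find? f = l.find? g := by
  induction l with
  | nil => rfl
  | cons p rest ih =>
    have hp := h p (by simp)
    simp only [List.find?_cons, hp]
    cases hg : g p
    · exact ih (fun q hq => h q (by simp [hq]))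
    · rfl

-- ===== VERDICT (by name: the statement is the Claim_ definition above) =====
set_option maxHeartbeats 1000000 in
theorem find_signature_with_name_py_spec : Claim_equal_find_signature_with_name_py := by
  intro lines name_parts _
  unfold Spec_find_signature_with_name_py
  unfold find_signature_with_name_py find_signature_with_name_py_alt
  by_cases he : name_parts.isEmpty
  · simp [he]
  · simp only [he, if_false]
    rw [pv_starter_idx_eq lines]
    set nameIdx := ((PySem.List.enumerate lines 0).filter
      (fun p => pvB_candWin (lines.map pvB_isStarter) p.1 &&
        pvB_isName (name_parts.map PySem.Str.lower) p.2)).map (·.1) with hN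
    -- B's walk as a find?
    have hwalk : pvB_walk nameIdx
        (((PySem.List.enumerate lines 0).filter (fun p => pvB_isStarter p.2)).map (·.1)) =
        (((PySem.List.enumerate lines 0).filter (fun p => pvB_isStarter p.2)).map (·.1)).find?
          (pvB_cond nameIdx) := by
      have hge : ∀ i ∈ ((PySem.List.enumerate lines 0).filter (fun p => pvB_isStarter p.2)).map (·.1),
          (-1 : Int) ≤ i := by
        intro i hi
        simp only [List.mem_map, List.mem_filter] at hi
        obtain ⟨p, ⟨hpE, _⟩, hp1⟩ := hi
        obtain ⟨k, hk, rfl⟩ := (PySem.List.mem_enumerate_iff _ _ _).mp hpE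
        simp at hp1; omega
      have hpw := (pv_name_idx_sorted lines (fun p => pvB_isStarter p.2))
      have hfull : nameIdx.dropWhile (fun m => decide (m ≤ (-1 : Int))) = nameIdx := by
        cases hN' : nameIdx with
        | nil => rfl
        | cons a t =>
          have ha : a ∈ nameIdx := by rw [hN']; simp
          rw [hN] at ha
          simp only [List.mem_map, List.mem_filter] at ha
          obtain ⟨p, ⟨hpE, _⟩, hp1⟩ := ha
          obtain ⟨k, hk, rfl⟩ := (PySem.List.mem_enumerate_iff _ _ _).mp hpE
          have : ¬ (a ≤ (-1 : Int)) := by simp at hp1; omega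
          simp [List.dropWhile_cons, this]
      calc pvB_walk nameIdx _
          = pvB_walk (nameIdx.dropWhile (fun m => decide (m ≤ (-1 : Int)))) _ := by rw [hfull]
        _ = _ := pvB_walk_eq_find? _ nameIdx (-1) hge hpw
    rw [hwalk, pv_find_filter_map, pvA_outer_eq_find?]
    simp only [Bool.false_eq_true, if_false]
    refine congrArg (Option.map (fun x : Int × String => x.1)) (pv_find_congr _ _ _ ?_)
    intro p hp
    obtain ⟨k, hk, rfl⟩ := (PySem.List.mem_enumerate_iff _ _ _).mp hp
    simp only [zero_add]
    by_cases hs : pvB_isStarter lines[k] = true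
    · rw [pv_window_eq lines name_parts k hk hs]
    · simp only [Bool.not_eq_true] at hs
      simp [hs]
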